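-- pv_equiv track=rewrite | github.com/eq-p99-tools/roboToald | roboToald/discord_client/commands/cmd_ds_data.py | combine_months
-- ===== SOURCE A (Python) =====
-- def combine_months(months, num_cols):
--     # Group months into sets of `num_cols`
--     month_groups = []
--     one_set = []
--     for i, month in enumerate(months):
--         if i % num_cols == 0 and i != 0:
--             month_groups.append(one_set)
--             one_set = []
--         one_set.append(month)
--     month_groups.append(one_set)
--
--     # Combine the months in each set, line by line
--     combined_months = []
--     for month_set in month_groups:
--         one_set = []
--         # Find the number of lines in the longest month
--         max_lines = max(len(month.splitlines()) for month in month_set)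
--         for i in range(max_lines):
--             line = ""
--             for month in month_set:
--                 try:
--                     line += month.splitlines()[i] + " || "
--                 except IndexError as e:
--                     line += " " * len(month.splitlines()[0]) + " || "
--             one_set.append(line[:-4])
--         combined_months.append('\n'.join(one_set))
--     return combined_months
-- ===== SOURCE B (Python) =====
-- def combine_months(months, num_cols):
--     size = abs(num_cols)
--     combined = []
--     for start in range(0, len(months), size):
--         group = months[start:start + size]
--         lines_per = [m.splitlines() for m in group]
--         max_lines = max(len(ls) for ls in lines_per)
--         padded = [ls + [' ' * len(ls[0])] * (max_lines - len(ls))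
--                   if len(ls) < max_lines else ls
--                   for ls in lines_per]
--         rows = [' || '.join(col) for col in zip(*padded)]
--         combined.append('\n'.join(rows))
--     return combined
-- ===== Notes on version B (the rewrite author's own statement) =====
-- stated objective: alternative
-- what changed: B slices the months list into chunks with a stepped range instead of the enumerate/modulo accumulator fold, computes splitlines once per month, pads each month's line list to a rectangle and transposes it with zip(*...), emitting each output row with ' || '.join instead of per-month string += followed by stripping the trailing separator.
import Mathlib
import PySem

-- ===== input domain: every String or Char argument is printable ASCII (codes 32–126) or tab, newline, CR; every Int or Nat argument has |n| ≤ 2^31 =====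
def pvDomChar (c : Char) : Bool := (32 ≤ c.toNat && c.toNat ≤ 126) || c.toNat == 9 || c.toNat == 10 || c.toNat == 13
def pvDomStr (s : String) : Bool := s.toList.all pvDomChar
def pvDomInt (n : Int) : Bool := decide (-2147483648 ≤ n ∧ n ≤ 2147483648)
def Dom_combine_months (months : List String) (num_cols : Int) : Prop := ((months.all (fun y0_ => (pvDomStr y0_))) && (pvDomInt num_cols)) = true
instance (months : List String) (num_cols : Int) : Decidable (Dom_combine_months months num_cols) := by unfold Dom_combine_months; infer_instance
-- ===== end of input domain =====

-- B re-implements combine_months by a different decomposition: chunking by stepped slices instead of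
-- A's enumerate/modulo accumulator fold, splitlines once per month, then pad each chunk to a rectangle
-- and transpose it, joining rows with separators instead of A's per-month += and trailing-strip.

-- ===== PORT A =====
-- " || " separator literal
def pvSep : List Char := " || ".toList

-- A's grouping loop: fold over enumerate(months) carrying (month_groups, one_set)
def pvFoldA (num_cols : Int) (l : List String) (s : Int)
    (acc : List (List String) × List String) : List (List String) × List String :=
  (PySem.List.enumerate l s).foldl
    (fun acc p =>
      if PySem.Int.mod p.1 num_cols = 0 ∧ p.1 ≠ 0 then (acc.1 ++ [acc.2], [p.2])
      else (acc.1, acc.2 ++ [p.2]))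
    acc

-- body of A's inner `for month in month_set` loop: try splitlines()[i] + " || " / except-IndexError path
def pvPieceA (m : String) (i : Nat) : List Char :=
  match (PySem.Chars.splitlines m.toList)[i]? with
  | some l => l ++ pvSep
  | none => List.replicate ((PySem.Chars.splitlines m.toList).getD 0 []).length ' ' ++ pvSep

-- one iteration of A's `for i in range(max_lines)` loop: line accumulated by += over the set
def pvRowA (month_set : List String) (i : Nat) : List Char :=
  month_set.foldl (fun line m => line ++ pvPieceA m i) []

-- body of A's `for month_set in month_groups` loop
def pvRenderA (month_set : List String) : String :=
  let max_lines := (PySem.List.max? (month_set.map fun m => (PySem.Chars.splitlines m.toList).length) id).getD 0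
  let one_set := (List.range max_lines).foldl
    (fun acc i => acc ++ [PySem.List.slice (pvRowA month_set i) none (some (-4))]) []
  String.ofList (PySem.Chars.join ['\n'] one_set)

def combine_months (months : List String) (num_cols : Int) : List String :=
  let st := pvFoldA num_cols months 0 ([], [])
  let month_groups := st.1 ++ [st.2]
  month_groups.foldl (fun combined month_set => combined ++ [pvRenderA month_set]) []

-- ===== PORT B =====
-- body of B's loop over chunk starts: splitlines once per month, pad to a rectangle, transpose, join
def pvRenderB (group : List String) : String :=
  let linesPer := group.map (fun m => PySem.Chars.splitlines m.toList)
  let maxLines := (PySem.List.max? (linesPer.map List.length) id).getD 0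
  let padded := linesPer.map (fun ls =>
    if ls.length < maxLines then
      ls ++ List.replicate (maxLines - ls.length) (List.replicate (ls.getD 0 []).length ' ')
    else ls)
  let rows := (List.range maxLines).map
    (fun i => PySem.Chars.join pvSep (padded.map (fun ls => ls.getD i [])))
  String.ofList (PySem.Chars.join ['\n'] rows)

def combine_months_alt (months : List String) (num_cols : Int) : List String :=
  let size : Nat := num_cols.natAbs
  (PySem.List.pyRange 0 (months.length : Int) (size : Int)).map
    (fun start => pvRenderB (PySem.List.slice months (some start) (some (start + (size : Int)))))

-- ===== PRECONDITION & SPEC =====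
-- Pre_ excludes exactly the inputs where the Python A raises: num_cols = 0 (ZeroDivisionError),
-- empty months (ValueError: max() of an empty group), and any chunk mixing empty and non-empty
-- month strings (IndexError computing the pad width splitlines()[0] of an empty month).
def Pre_combine_months (months : List String) (num_cols : Int) : Prop :=
  num_cols ≠ 0 ∧ months ≠ [] ∧
  ∀ k < months.length,
    ((months.drop (k * num_cols.natAbs)).take num_cols.natAbs).all (fun m => m ≠ "") = true ∨
    ((months.drop (k * num_cols.natAbs)).take num_cols.natAbs).all (fun m => m = "") = true
instance (months : List String) (num_cols : Int) : Decidable (Pre_combine_months months num_cols) := by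
  unfold Pre_combine_months; infer_instance

def pvWitness_combine_months : List String × Int := (["Jan 1\nJan 2", "Feb 1", "Mar 1\nMar 2"], 2)

def Spec_combine_months (months : List String) (num_cols : Int) (out : List String) : Prop :=
  out = combine_months_alt months num_cols
instance (months : List String) (num_cols : Int) (out : List String) : Decidable (Spec_combine_months months num_cols out) := by
  unfold Spec_combine_months; infer_instance

-- ===== CLAIM (what is proved, stated in full; the proofs are below) =====
def Claim_equal_combine_months : Prop := ∀ (months : List String) (num_cols : Int), Dom_combine_months months num_cols → Pre_combine_months months num_cols → Spec_combine_months months num_cols (combine_months months num_cols)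

-- ===== LEMMAS AND PROOFS =====

-- the common chunk shape both groupings reduce to
def pvChunks (n : Nat) (l : List String) : List (List String) :=
  if _h : n = 0 ∨ l.length ≤ n then [l]
  else l.take n :: pvChunks n (l.drop n)
termination_by l.length
decreasing_by simp only [List.length_drop]; omega

def pvCont (n : Nat) (c : List String) (rest : List String) : List (List String) :=
  if rest = [] then [c] else c :: pvChunks n rest

lemma pvChunks_eq_cont (n : Nat) (hn : 0 < n) (m : String) (l : List String) :
    pvChunks n (m :: l) = pvCont n (m :: l.take (n - 1)) (l.drop (n - 1)) := by
  obtain ⟨j, rfl⟩ := Nat.exists_eq_succ_of_ne_zero hn.ne'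
  rw [pvChunks, pvCont]
  by_cases h : l.length ≤ j
  · have hd : l.drop j = [] := by rw [List.drop_eq_nil_iff]; omega
    have ht : l.take j = l := List.take_of_length_le h
    simp [hd, ht, h]
  · have hd : l.drop (j + 1 - 1) ≠ [] := by rw [ne_eq, List.drop_eq_nil_iff]; omega
    rw [dif_neg (by simp; omega), if_neg hd]
    simp

lemma pvFoldA_spec (num_cols : Int) (hnc : num_cols ≠ 0) :
    ∀ (l : List String) (k : Nat), k < num_cols.natAbs →
    ∀ (s : Int), 0 < s → ((num_cols.natAbs : Int) ∣ s + k) →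
    ∀ (gs : List (List String)) (cur : List String),
    (pvFoldA num_cols l s (gs, cur)).1 ++ [(pvFoldA num_cols l s (gs, cur)).2]
      = gs ++ pvCont num_cols.natAbs (cur ++ l.take k) (l.drop k) := by
  intro l
  induction l with
  | nil =>
    intro k hk s hs hdvd gs cur
    simp [pvFoldA, PySem.List.enumerate_nil, pvCont]
  | cons m l IH =>
    intro k hk s hs hdvd gs cur
    have hn : 0 < num_cols.natAbs := Int.natAbs_pos.mpr hnc
    simp only [pvFoldA, PySem.List.enumerate_cons, List.foldl_cons]
    by_cases hk0 : k = 0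
    · subst hk0
      have hdvd' : ((num_cols.natAbs : Nat) : Int) ∣ s := by simpa using hdvd
      have hcond : PySem.Int.mod s num_cols = 0 ∧ s ≠ 0 :=
        ⟨(PySem.Int.mod_eq_zero_iff_dvd s num_cols).mpr (Int.natAbs_dvd.mp hdvd'), by omega⟩
      rw [if_pos hcond]
      have h1 : ((num_cols.natAbs : Nat) : Int) ∣ (s + 1) + ((num_cols.natAbs - 1 : Nat) : Int) := by
        have he : (s + 1) + ((num_cols.natAbs - 1 : Nat) : Int) = s + (num_cols.natAbs : Int) := by omega
        rw [he]; exact dvd_add hdvd' (dvd_refl _)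
      have := IH (num_cols.natAbs - 1) (by omega) (s + 1) (by omega) h1 (gs ++ [cur]) [m]
      simp only [pvFoldA] at this
      rw [this]
      have hc : pvCont num_cols.natAbs cur (m :: l)
          = cur :: pvCont num_cols.natAbs (m :: List.take (num_cols.natAbs - 1) l)
              (List.drop (num_cols.natAbs - 1) l) := by
        rw [pvCont, if_neg (by simp), ← pvChunks_eq_cont num_cols.natAbs hn m l]
      simp [hc]
    · have hnd : ¬ (PySem.Int.mod s num_cols = 0 ∧ s ≠ 0) := by
        intro hcond
        have h1 : ((num_cols.natAbs : Nat) : Int) ∣ s :=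
          Int.natAbs_dvd.mpr ((PySem.Int.mod_eq_zero_iff_dvd s num_cols).mp hcond.1)
        have h2 : ((num_cols.natAbs : Nat) : Int) ∣ ((k : Nat) : Int) := by
          have := dvd_sub hdvd h1
          simpa using this
        exact hk0 (Nat.eq_zero_of_dvd_of_lt (Int.natCast_dvd_natCast.mp h2) hk)
      rw [if_neg hnd]
      obtain ⟨j, rfl⟩ := Nat.exists_eq_succ_of_ne_zero hk0
      have h1 : ((num_cols.natAbs : Nat) : Int) ∣ (s + 1) + ((j : Nat) : Int) := by
        have he : (s + 1) + ((j : Nat) : Int) = s + ((j + 1 : Nat) : Int) := by omega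
        rw [he]; exact_mod_cast hdvd
      have := IH j (by omega) (s + 1) (by omega) h1 gs (cur ++ [m])
      simp only [pvFoldA] at this
      rw [this]
      simp

lemma groupsA_eq_chunks (num_cols : Int) (hnc : num_cols ≠ 0) (m : String) (rest : List String) :
    (pvFoldA num_cols (m :: rest) 0 ([], [])).1 ++ [(pvFoldA num_cols (m :: rest) 0 ([], [])).2]
      = pvChunks num_cols.natAbs (m :: rest) := by
  have hn : 0 < num_cols.natAbs := Int.natAbs_pos.mpr hnc
  have hstep : pvFoldA num_cols (m :: rest) 0 ([], []) = pvFoldA num_cols rest 1 ([], [m]) := by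
    simp only [pvFoldA, PySem.List.enumerate_cons, List.foldl_cons]
    rw [if_neg (by simp)]
    norm_num
  rw [hstep]
  have h1 : ((num_cols.natAbs : Nat) : Int) ∣ 1 + ((num_cols.natAbs - 1 : Nat) : Int) := by
    have he : (1 : Int) + ((num_cols.natAbs - 1 : Nat) : Int) = (num_cols.natAbs : Int) := by omega
    rw [he]
  rw [pvFoldA_spec num_cols hnc rest (num_cols.natAbs - 1) (by omega) 1 (by omega) h1 [] [m]]
  rw [pvChunks_eq_cont num_cols.natAbs hn m rest]
  simp

lemma range_map_eq_chunks (n : Nat) (hn : 0 < n) :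
    ∀ (l : List String), l ≠ [] →
    (List.range ((l.length + n - 1) / n)).map (fun k => (l.drop (n * k)).take n) = pvChunks n l := by
  intro l
  induction hl : l.length using Nat.strong_induction_on generalizing l with
  | _ L IH =>
  intro hne
  subst hl
  have hlen : 0 < l.length := List.length_pos_iff.mpr hne
  by_cases h : l.length ≤ n
  · have hc : (l.length + n - 1) / n = 1 := Nat.div_eq_of_lt_le (by omega) (by omega)
    rw [hc, List.range_one, pvChunks, dif_pos (Or.inr h)]
    simp [List.take_of_length_le h]
  · have hc : (l.length + n - 1) / n = ((l.drop n).length + n - 1) / n + 1 := by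
      have he : l.length + n - 1 = ((l.drop n).length + n - 1) + n := by simp; omega
      rw [he, Nat.add_div_right _ hn]
    rw [hc, List.range_succ_eq_map, pvChunks, dif_neg (by omega)]
    simp only [List.map_cons, List.map_map]
    congr 1
    have hIH := IH (l.drop n).length (by simp; omega) (l.drop n) rfl (by rw [ne_eq, List.drop_eq_nil_iff]; omega)
    simp only [List.length_drop] at hIH
    simp only [List.length_drop]
    rw [← hIH]
    apply List.map_congr_left
    intro k _
    simp only [Function.comp_apply, List.drop_drop, Nat.succ_eq_add_one]
    congr 2
    ring

lemma groupsB_eq_chunks (num_cols : Int) (hnc : num_cols ≠ 0) (l : List String) (hl : l ≠ []) :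
    (PySem.List.pyRange 0 (l.length : Int) ((num_cols.natAbs : Nat) : Int)).map
      (fun start => PySem.List.slice l (some start) (some (start + ((num_cols.natAbs : Nat) : Int))))
      = pvChunks num_cols.natAbs l := by
  have hn : 0 < num_cols.natAbs := Int.natAbs_pos.mpr hnc
  have hlen : 0 < l.length := List.length_pos_iff.mpr hl
  rw [PySem.List.pyRange_of_pos 0 (l.length : Int) (by exact_mod_cast hn)]
  rw [if_pos (by exact_mod_cast hlen)]
  have hcnt : ((((l.length : Int) - 0 + (num_cols.natAbs : Int) - 1)) / (num_cols.natAbs : Int)).toNat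
      = (l.length + num_cols.natAbs - 1) / num_cols.natAbs := by
    have he : ((l.length : Int) - 0 + (num_cols.natAbs : Int) - 1)
        = ((l.length + num_cols.natAbs - 1 : Nat) : Int) := by omega
    rw [he, ← Int.natCast_div, Int.toNat_natCast]
  rw [hcnt, List.map_map]
  rw [← range_map_eq_chunks num_cols.natAbs hn l hl]
  apply List.map_congr_left
  intro k _
  simp only [Function.comp_apply, zero_add]
  have h1 : ((num_cols.natAbs : Int) * (k : Int)) = ((num_cols.natAbs * k : Nat) : Int) := by
    push_cast; ring
  rw [h1]
  exact PySem.List.slice_natCast_add l (num_cols.natAbs * k) num_cols.natAbs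

lemma slice_join (ps : List (List Char)) (hps : ps ≠ []) :
    PySem.List.slice ((ps.map (· ++ pvSep)).flatten) none (some (-4)) = PySem.Chars.join pvSep ps := by
  have hflat : ∀ (qs : List (List Char)), qs ≠ [] →
      (qs.map (· ++ pvSep)).flatten = PySem.Chars.join pvSep qs ++ pvSep := by
    intro qs
    induction qs with
    | nil => intro h; exact absurd rfl h
    | cons p rest IH =>
      intro _
      cases rest with
      | nil => simp [PySem.Chars.join_singleton]
      | cons q rest' =>
        rw [List.map_cons, List.flatten_cons, IH (by simp), PySem.Chars.join_cons_cons]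
        simp [List.append_assoc]
  rw [hflat ps hps]
  rw [PySem.List.slice_to_neg_ofNat _ 4 (by norm_num)]
  have hsep : pvSep.length = 4 := by decide
  rw [List.length_append, hsep, Nat.add_sub_cancel]
  exact List.take_left

-- proof-side view of pvPieceA without the trailing separator
def pvCore (m : String) (i : Nat) : List Char :=
  match (PySem.Chars.splitlines m.toList)[i]? with
  | some l => l
  | none => List.replicate ((PySem.Chars.splitlines m.toList).getD 0 []).length ' '

lemma pvPieceA_eq (m : String) (i : Nat) : pvPieceA m i = pvCore m i ++ pvSep := by
  unfold pvPieceA pvCore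
  cases h : (PySem.Chars.splitlines m.toList)[i]? <;> simp

lemma pad_getD (ls : List (List Char)) (i M : Nat) (hi : i < M) :
    (if ls.length < M then
        ls ++ List.replicate (M - ls.length) (List.replicate (ls.getD 0 []).length ' ')
      else ls).getD i []
    = (match ls[i]? with
       | some l => l
       | none => List.replicate ((ls.getD 0 []).length) ' ') := by
  by_cases h : i < ls.length
  · rw [List.getElem?_eq_getElem h]
    by_cases hp : ls.length < M
    · rw [if_pos hp, List.getD_append _ _ _ i h, List.getD_eq_getElem _ _ h]
    · rw [if_neg hp, List.getD_eq_getElem _ _ h]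
  · rw [List.getElem?_eq_none (by omega)]
    rw [if_pos (by omega), List.getD_append_right _ _ _ i (by omega)]
    exact List.getD_replicate _ (by omega)

lemma pvRowA_eq (g : List String) (i : Nat) (hg : g ≠ []) :
    PySem.List.slice (pvRowA g i) none (some (-4)) = PySem.Chars.join pvSep (g.map (pvCore · i)) := by
  rw [pvRowA]
  rw [PySem.List.foldl_append_eq_flatMap (fun m => pvPieceA m i) g []]
  have h1 : List.flatMap (fun m => pvPieceA m i) g = ((g.map (pvCore · i)).map (· ++ pvSep)).flatten := by
    rw [List.flatMap_def, List.map_map]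
    congr 1
    apply List.map_congr_left
    intro m _
    exact pvPieceA_eq m i
  rw [List.nil_append, h1]
  exact slice_join _ (by simpa using hg)

lemma pvRenderA_eq_pvRenderB (g : List String) : pvRenderA g = pvRenderB g := by
  rcases eq_or_ne g [] with rfl | hg
  · simp [pvRenderA, pvRenderB, PySem.List.max?]
  · simp only [pvRenderA, pvRenderB, List.map_map]
    rw [PySem.List.foldl_append_singleton_eq_map, List.nil_append]
    have hmax : (List.map (List.length ∘ fun m => PySem.Chars.splitlines m.toList) g)
        = (g.map fun m => (PySem.Chars.splitlines m.toList).length) := by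
      simp [Function.comp_def]
    rw [hmax]
    congr 2
    apply List.map_congr_left
    intro i hi
    rw [List.mem_range] at hi
    rw [pvRowA_eq g i hg]
    congr 1
    apply List.map_congr_left
    intro m _
    simp only [Function.comp_apply]
    rw [pad_getD _ i _ hi]
    rfl

-- ===== VERDICT (by name: the statement is the Claim_ definition above) =====
theorem combine_months_spec : Claim_equal_combine_months := by
  intro months num_cols _hdom hpre
  obtain ⟨hnc, hne, -⟩ := hpre
  unfold Spec_combine_months
  simp only [combine_months, combine_months_alt]
  rw [PySem.List.foldl_append_singleton_eq_map, List.nil_append]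
  obtain ⟨m, rest, rfl⟩ := List.exists_cons_of_ne_nil hne
  rw [groupsA_eq_chunks num_cols hnc m rest]
  rw [show (fun start => pvRenderB (PySem.List.slice (m :: rest) (some start) (some (start + ((num_cols.natAbs : Nat) : Int)))))
      = pvRenderB ∘ (fun start => PySem.List.slice (m :: rest) (some start) (some (start + ((num_cols.natAbs : Nat) : Int)))) from rfl]
  rw [← List.map_map]
  rw [groupsB_eq_chunks num_cols hnc (m :: rest) hne]
  apply List.map_congr_left
  intro g _
  exact pvRenderA_eq_pvRenderB g
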